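-- pv_equiv track=rewrite | github.com/sarathvs/codeChallenges | maxNumberFromDigits.py | solution
-- ===== SOURCE A (Python) =====
-- def solution(N):
--     stringN = str(N)
--     countList = [0]* 10
--     maxValue = 0
--
--     for i in range(len(stringN)):
--         countList[int(stringN[i])] += 1
--
--     mutiplicationFactor = 1
--
--     for j in range(10):
--         while countList[j] > 0:
--             value = j * mutiplicationFactor
--             countList[j] = countList[j] - 1
--             maxValue = maxValue + value
--             mutiplicationFactor = mutiplicationFactor * 10
--
--
--     return maxValue
-- ===== SOURCE B (Python) =====
-- def solution(N):
--     result = 0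
--     for ch in sorted(str(N), reverse=True):
--         result = result * 10 + int(ch)
--     return result
-- ===== Notes on version B (the rewrite author's own statement) =====
-- stated objective: idiomatic
-- what changed: Replaces the ten counting buckets rebuilt into a number least-significant-digit-first by a power accumulator with a direct comparison sort of the digit characters descending followed by a single Horner fold (result = result*10 + digit).
import Mathlib
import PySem

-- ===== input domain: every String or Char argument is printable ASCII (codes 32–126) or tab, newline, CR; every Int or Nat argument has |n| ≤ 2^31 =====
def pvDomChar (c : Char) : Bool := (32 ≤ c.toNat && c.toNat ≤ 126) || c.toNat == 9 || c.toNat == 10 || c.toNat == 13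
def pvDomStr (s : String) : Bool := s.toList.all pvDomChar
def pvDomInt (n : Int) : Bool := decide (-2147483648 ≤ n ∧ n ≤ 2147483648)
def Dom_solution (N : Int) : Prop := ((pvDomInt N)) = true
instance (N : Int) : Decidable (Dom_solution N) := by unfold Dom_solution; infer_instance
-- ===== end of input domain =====

-- B replaces A's counting buckets + least-significant-first power accumulator by a
-- descending comparison sort of the digit characters and a single Horner fold (idiomatic, same cost class).

-- ===== PORT A =====
-- 'while countList[j] > 0': each pass decrements the count by one, so the loop body runs
-- exactly (countList[j]).toNat times (counts are nonnegative); the count is the fuel.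
def solutionWhile (j : Int) : Nat → Int → Int → Int × Int
  | 0, mv, mf => (mv, mf)
  | c + 1, mv, mf => solutionWhile j c (mv + j * mf) (mf * 10)

-- body of 'for i in range(len(stringN)): countList[int(stringN[i])] += 1';
-- int(stringN[i]) is ofChars? [c]; the .getD 0 is unreachable under Pre_ (digits only)
def solutionDigitStep (cl : List Int) (c : Char) : List Int :=
  PySem.List.pySetD cl ((PySem.Int.ofChars? [c]).getD 0)
    (PySem.List.pyGetD cl ((PySem.Int.ofChars? [c]).getD 0) 0 + 1)

-- body of 'for j in range(10): while …' over the state (countList, maxValue, multiplicationFactor)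
def solutionJStep (st : List Int × Int × Int) (j : Int) : List Int × Int × Int :=
  let r := solutionWhile j (PySem.List.pyGetD st.1 j 0).toNat st.2.1 st.2.2
  (PySem.List.pySetD st.1 j 0, r.1, r.2)

def solution (N : Int) : Int :=
  let stringN := (PySem.Int.toStr N).toList
  let countList := (PySem.List.pyRange 0 (PySem.List.len stringN)).foldl
      (fun cl i => solutionDigitStep cl (PySem.List.pyGetD stringN i ' '))
      (List.replicate 10 (0 : Int))
  ((PySem.List.pyRange 0 10).foldl solutionJStep (countList, 0, 1)).2.1

-- ===== PORT B =====
-- result = 0; for ch in sorted(str(N), reverse=True): result = result*10 + int(ch)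
-- int(ch) is ofChars? [ch]; the .getD 0 is unreachable under Pre_ (digits only)
def solution_alt (N : Int) : Int :=
  (PySem.List.sorted (PySem.Int.toStr N).toList (fun c => c) true).foldl
    (fun r c => r * 10 + (PySem.Int.ofChars? [c]).getD 0) 0

-- ===== PRECONDITION & SPEC =====
-- Pre_ excludes negative N, where str(N) contains a minus sign and both A (in int(stringN[i]))
-- and B (in int(ch)) raise ValueError.
def Pre_solution (N : Int) : Prop := 0 ≤ N
instance (N : Int) : Decidable (Pre_solution N) := by unfold Pre_solution; infer_instance
def pvWitness_solution : Int := (201)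

def Spec_solution (N : Int) (out : Int) : Prop := out = solution_alt N
instance (N : Int) (out : Int) : Decidable (Spec_solution N out) := by unfold Spec_solution; infer_instance

-- ===== CLAIM (what is proved, stated in full; the proofs are below) =====
def Claim_equal_solution : Prop := ∀ (N : Int), Dom_solution N → Pre_solution N → Spec_solution N (solution N)

-- ===== LEMMAS AND PROOFS =====

-- digit value of a character, '0'+j, value of a little-endian digit list, counting-sorted digit characters
def dval (c : Char) : Int := (c.toNat : Int) - 48
def chj (j : Nat) : Char := Char.ofNat (48 + j)
def valLSB : List Int → Int
  | [] => 0
  | d :: xs => d + 10 * valLSB xs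
def ascC (ds : List Char) : List Char :=
  (List.range 10).flatMap (fun j => List.replicate (ds.count (chj j)) (chj j))

lemma digit_bounds (c : Char) (h : c.isDigit = true) : 48 ≤ c.toNat ∧ c.toNat ≤ 57 := by
  simp [Char.isDigit, decide_eq_true_eq] at h
  exact ⟨h.1, h.2⟩

lemma ofChars_digit (c : Char) (h : c.isDigit = true) :
    PySem.Int.ofChars? [c] = some ((c.toNat : Int) - 48) := by
  obtain ⟨h1, h2⟩ := digit_bounds c h
  have aux : ∀ n : Nat, 48 ≤ n → n ≤ 57 →
      PySem.Int.ofChars? [Char.ofNat n] = some ((n : Int) - 48) := by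
    intro n hn1 hn2
    interval_cases n <;> decide
  have := aux c.toNat h1 h2
  rwa [Char.ofNat_toNat] at this

lemma chj_toNat (j : Nat) (h : j < 10) : (chj j).toNat = 48 + j := by
  interval_cases j <;> decide

lemma isDigit_chj (j : Nat) (h : j < 10) : (chj j).isDigit = true := by
  interval_cases j <;> decide

lemma eq_chj (c : Char) (h : c.isDigit = true) : c = chj (c.toNat - 48) := by
  obtain ⟨h1, h2⟩ := digit_bounds c h
  have : 48 + (c.toNat - 48) = c.toNat := by omega
  rw [chj, this, Char.ofNat_toNat]

lemma dval_chj (j : Nat) (h : j < 10) : dval (chj j) = (j : Int) := by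
  rw [dval, chj_toNat j h]; push_cast; ring

lemma chj_le (j j' : Nat) (h : j ≤ j') (h' : j' < 10) : chj j ≤ chj j' := by
  rw [Char.le_def, UInt32.le_iff_toNat_le]
  have e1 := chj_toNat j (lt_of_le_of_lt h h')
  have e2 := chj_toNat j' h'
  simp only [Char.toNat] at e1 e2
  omega

lemma valLSB_append (xs ys : List Int) :
    valLSB (xs ++ ys) = valLSB xs + 10 ^ xs.length * valLSB ys := by
  induction xs with
  | nil => simp [valLSB]
  | cons d xs ih => simp [valLSB, ih]; ring

lemma while_spec (c : Nat) (j mv mf : Int) :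
    solutionWhile j c mv mf = (mv + mf * valLSB (List.replicate c j), mf * 10 ^ c) := by
  induction c generalizing mv mf with
  | zero => simp [solutionWhile, valLSB]
  | succ c ih =>
      rw [solutionWhile, ih, List.replicate_succ, valLSB, Prod.mk.injEq]
      constructor <;> ring

lemma count_len (ds : List Char) (cl : List Int) :
    (List.foldl solutionDigitStep cl ds).length = cl.length := by
  induction ds generalizing cl with
  | nil => rfl
  | cons c ds ih =>
      rw [List.foldl_cons, ih]
      simp [solutionDigitStep, PySem.List.length_pySetD]

lemma count_spec (ds : List Char) (cl : List Int) (hd : ∀ c ∈ ds, c.isDigit = true)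
    (hl : cl.length = 10) (j : Nat) (hj : j < 10) :
    (List.foldl solutionDigitStep cl ds).getD j 0 = cl.getD j 0 + (ds.count (chj j) : Int) := by
  induction ds generalizing cl with
  | nil => simp
  | cons c ds ih =>
      have hc := hd c List.mem_cons_self
      obtain ⟨h1, h2⟩ := digit_bounds c hc
      have htn : ((c.toNat : Int) - 48).toNat = c.toNat - 48 := by omega
      have hstep : solutionDigitStep cl c
          = cl.set (c.toNat - 48) (cl.getD (c.toNat - 48) 0 + 1) := by
        rw [solutionDigitStep, ofChars_digit c hc]
        simp only [Option.getD_some]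
        rw [PySem.List.pySetD_of_nonneg _ _ (by omega), PySem.List.pyGetD_of_nonneg _ _ (by omega), htn]
      rw [List.foldl_cons, hstep,
        ih _ (fun x hx => hd x (List.mem_cons_of_mem c hx)) (by simp [hl]),
        List.count_cons]
      by_cases hkj : c.toNat - 48 = j
      · have hcj : c = chj j := hkj ▸ eq_chj c hc
        rw [hkj]
        simp [List.getD, hl ▸ hj, hcj]
        ring
      · have hne : c ≠ chj j := by
          intro hcc
          apply hkj
          rw [hcc, chj_toNat j hj]
          omega
        simp [List.getD, hkj, hne]

lemma flatMap_congr_mem {α β : Type} (js : List α) (f g : α → List β)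
    (h : ∀ x ∈ js, f x = g x) : js.flatMap f = js.flatMap g := by
  induction js with
  | nil => rfl
  | cons j js ih =>
      simp only [List.flatMap_cons, h j (List.mem_cons_self), ih fun x hx => h x (List.mem_cons_of_mem j hx)]

lemma outer_spec (js : List Nat) (cl : List Int) (mv mf : Int)
    (hl : cl.length = 10) (hjs : ∀ j ∈ js, j < 10) (hnd : js.Nodup) :
    ((js.map (fun k : Nat => (k : Int))).foldl solutionJStep (cl, mv, mf)).2.1
      = mv + mf * valLSB (js.flatMap fun j => List.replicate (cl.getD j 0).toNat ((j : Nat) : Int)) := by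
  induction js generalizing cl mv mf with
  | nil => simp [valLSB]
  | cons j js ih =>
      rw [List.map_cons, List.foldl_cons]
      have hstep : solutionJStep (cl, mv, mf) ((j : Nat) : Int)
          = (cl.set j 0,
             mv + mf * valLSB (List.replicate (cl.getD j 0).toNat ((j : Nat) : Int)),
             mf * 10 ^ (cl.getD j 0).toNat) := by
        rw [solutionJStep]
        simp only [PySem.List.pyGetD_natCast, PySem.List.pySetD_natCast]
        rw [while_spec]
      rw [hstep, ih (cl.set j 0) _ _ (by simp [hl])
        (fun x hx => hjs x (List.mem_cons_of_mem j hx)) hnd.of_cons]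
      have hset : (js.flatMap fun j' => List.replicate (((cl.set j 0).getD j' 0).toNat) ((j' : Nat) : Int))
          = js.flatMap fun j' => List.replicate ((cl.getD j' 0).toNat) ((j' : Nat) : Int) := by
        apply flatMap_congr_mem
        intro x hx
        have hxj : j ≠ x := fun he => (List.nodup_cons.mp hnd).1 (he ▸ hx)
        simp [List.getD, hxj]
      rw [hset, List.flatMap_cons, valLSB_append, List.length_replicate]
      ring

lemma chj_inj (j k : Nat) (hj : j < 10) (hk : k < 10) (h : chj j = chj k) : j = k := by
  have e1 := chj_toNat j hj
  have e2 := chj_toNat k hk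
  rw [h] at e1
  omega

lemma count_flat_zero (f : Nat → Nat) (js : List Nat) (k : Nat) (hk : k < 10)
    (h10 : ∀ j ∈ js, j < 10) (hnm : k ∉ js) :
    (js.flatMap fun j => List.replicate (f j) (chj j)).count (chj k) = 0 := by
  induction js with
  | nil => rfl
  | cons j js ih =>
      rw [List.flatMap_cons, List.count_append, List.count_replicate,
        if_neg, ih (fun x hx => h10 x (List.mem_cons_of_mem j hx))
          (fun hx => hnm (List.mem_cons_of_mem j hx))]
      intro hbe
      have := chj_inj j k (h10 j List.mem_cons_self) hk (beq_iff_eq.mp hbe)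
      exact hnm (this ▸ List.mem_cons_self)

lemma count_flat (f : Nat → Nat) (js : List Nat) (k : Nat) (hk : k < 10)
    (h10 : ∀ j ∈ js, j < 10) (hnd : js.Nodup) (hm : k ∈ js) :
    (js.flatMap fun j => List.replicate (f j) (chj j)).count (chj k) = f k := by
  induction js with
  | nil => cases hm
  | cons j js ih =>
      rw [List.flatMap_cons, List.count_append]
      rcases List.mem_cons.mp hm with he | hm'
      · rw [← he, List.count_replicate, if_pos (beq_iff_eq.mpr rfl),
          count_flat_zero f js k hk (fun x hx => h10 x (List.mem_cons_of_mem j hx))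
            (he ▸ (List.nodup_cons.mp hnd).1)]
        omega
      · rw [List.count_replicate, if_neg, ih (fun x hx => h10 x (List.mem_cons_of_mem j hx)) hnd.of_cons hm']
        · omega
        · intro hbe
          exact (List.nodup_cons.mp hnd).1
            (chj_inj j k (h10 j List.mem_cons_self) hk (beq_iff_eq.mp hbe) ▸ hm')

lemma mem_ascC_digit (ds : List Char) (a : Char) (ha : a ∈ ascC ds) : a.isDigit = true := by
  obtain ⟨j, hj, ha'⟩ := List.mem_flatMap.mp ha
  rw [List.eq_of_mem_replicate ha']
  exact isDigit_chj j (List.mem_range.mp hj)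

lemma count_ascC (ds : List Char) (hd : ∀ c ∈ ds, c.isDigit = true) (a : Char) :
    (ascC ds).count a = ds.count a := by
  by_cases hdig : a.isDigit = true
  · obtain ⟨h1, h2⟩ := digit_bounds a hdig
    have ha : a = chj (a.toNat - 48) := eq_chj a hdig
    rw [ha, ascC, count_flat _ _ _ (by omega) (fun j hj => List.mem_range.mp hj)
      List.nodup_range (List.mem_range.mpr (by omega))]
  · rw [List.count_eq_zero.mpr (fun hm => hdig (mem_ascC_digit ds a hm)),
      List.count_eq_zero.mpr (fun hm => hdig (hd a hm))]

lemma perm_ascC (ds : List Char) (hd : ∀ c ∈ ds, c.isDigit = true) : (ascC ds).Perm ds :=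
  List.perm_iff_count.mpr fun a => count_ascC ds hd a

lemma pw_flat (f : Nat → Nat) (js : List Nat) (hpw : js.Pairwise (· < ·)) (h10 : ∀ j ∈ js, j < 10) :
    (js.flatMap fun j => List.replicate (f j) (chj j)).Pairwise (· ≤ ·) := by
  induction js with
  | nil => simp
  | cons j js ih =>
      rw [List.flatMap_cons, List.pairwise_append]
      refine ⟨List.pairwise_replicate.mpr (Or.inr le_rfl),
        ih hpw.of_cons (fun x hx => h10 x (List.mem_cons_of_mem j hx)), ?_⟩
      intro a ha b hb
      rw [List.eq_of_mem_replicate ha]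
      obtain ⟨j', hj', hb'⟩ := List.mem_flatMap.mp hb
      rw [List.eq_of_mem_replicate hb']
      exact chj_le j j' (le_of_lt (List.rel_of_pairwise_cons hpw hj'))
        (h10 j' (List.mem_cons_of_mem j hj'))

lemma sorted_eq_ascC (ds : List Char) (hd : ∀ c ∈ ds, c.isDigit = true) :
    PySem.List.sorted ds (fun c => c) true = (ascC ds).reverse := by
  apply List.Perm.eq_of_pairwise (le := fun a b : Char => b ≤ a)
  · intro a b _ _ hab hba; exact le_antisymm hba hab
  · exact PySem.List.sorted_pairwise_rev ds (fun c => c)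
  · rw [List.pairwise_reverse]
    exact pw_flat _ _ List.pairwise_lt_range (fun j hj => List.mem_range.mp hj)
  · exact (PySem.List.sorted_perm ds (fun c => c) true).trans
      ((perm_ascC ds hd).symm.trans (List.reverse_perm (ascC ds)).symm)

lemma horner_rev (xs : List Int) (r : Int) :
    xs.reverse.foldl (fun a d => a * 10 + d) r = r * 10 ^ xs.length + valLSB xs := by
  induction xs generalizing r with
  | nil => simp [valLSB]
  | cons d xs ih =>
      rw [List.reverse_cons, List.foldl_append, ih, valLSB]
      simp; ring

lemma map_dval_flat (f : Nat → Nat) (js : List Nat) (h10 : ∀ j ∈ js, j < 10) :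
    ((js.flatMap fun j => List.replicate (f j) (chj j)).map dval)
      = js.flatMap fun j => List.replicate (f j) ((j : Nat) : Int) := by
  induction js with
  | nil => rfl
  | cons j js ih =>
      simp only [List.flatMap_cons, List.map_append, List.map_replicate,
        dval_chj j (h10 j List.mem_cons_self), ih fun x hx => h10 x (List.mem_cons_of_mem j hx)]

lemma digits_toChars (N : Int) (h : 0 ≤ N) :
    ∀ c ∈ PySem.Int.toChars N, c.isDigit = true := by
  intro c hc
  rw [PySem.Int.toChars, if_neg (by omega)] at hc
  exact Nat.isDigit_of_mem_toDigits (by norm_num) (by norm_num) hc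

-- ===== VERDICT (by name: the statement is the Claim_ definition above) =====
theorem solution_spec : Claim_equal_solution := by
  intro N _ hpre
  unfold Spec_solution
  have hds : (PySem.Int.toStr N).toList = PySem.Int.toChars N := PySem.Int.toList_toStr N
  have hd : ∀ c ∈ PySem.Int.toChars N, c.isDigit = true := digits_toChars N hpre
  rw [solution, solution_alt, hds]
  set ds := PySem.Int.toChars N with hdsdef
  -- A's counting loop is a fold over the characters of ds
  have hcount : (PySem.List.pyRange 0 (PySem.List.len ds)).foldl
      (fun cl i => solutionDigitStep cl (PySem.List.pyGetD ds i ' ')) (List.replicate 10 (0 : Int))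
      = List.foldl solutionDigitStep (List.replicate 10 (0 : Int)) ds := by
    rw [PySem.List.foldl_pyRange_pyGetD ds ' ' solutionDigitStep _ le_rfl]
    simp
  rw [hcount]
  set cl := List.foldl solutionDigitStep (List.replicate 10 (0 : Int)) ds with hcl
  have hlen : cl.length = 10 := by rw [hcl, count_len]; simp
  have hget : ∀ j, j < 10 → cl.getD j 0 = (ds.count (chj j) : Int) := by
    intro j hj
    rw [hcl, count_spec ds _ hd (by simp) j hj, List.getD_replicate _ hj, zero_add]
  -- A's j-loop runs over range(10)
  have hrange : PySem.List.pyRange 0 10 = (List.range 10).map (fun k : Nat => (k : Int)) := by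
    exact_mod_cast PySem.List.pyRange_zero_nat 10
  rw [hrange, outer_spec (List.range 10) cl 0 1 hlen
    (fun j hj => List.mem_range.mp hj) List.nodup_range]
  have hflat : (List.range 10).flatMap (fun j => List.replicate (cl.getD j 0).toNat ((j : Nat) : Int))
      = (List.range 10).flatMap (fun j => List.replicate (ds.count (chj j)) ((j : Nat) : Int)) := by
    apply flatMap_congr_mem
    intro j hj
    rw [hget j (List.mem_range.mp hj), Int.toNat_natCast]
  rw [hflat]
  -- B's sort is the reversed counting-sorted list; its fold is a Horner evaluation
  rw [sorted_eq_ascC ds hd,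
    PySem.List.foldl_congr_mem ((ascC ds).reverse) _ (fun r c => r * 10 + dval c) 0
      (fun acc x hx => by
        rw [ofChars_digit x (mem_ascC_digit ds x (List.mem_reverse.mp hx)), Option.getD_some]
        rfl),
    ← List.foldl_map (f := dval) (g := fun a d => a * 10 + d), List.map_reverse, horner_rev, ascC,
    map_dval_flat (fun j => ds.count (chj j)) (List.range 10) (fun j hj => List.mem_range.mp hj)]
  ring
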